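-- pv_equiv track=rewrite | github.com/MinJunKimKR/practice-programming | algorithm/programmers/highScoreKit/Greedy/2_joystick.py | solution
-- ===== SOURCE A (Python) =====
-- def solution(name):
--     answer = 0
--     alpa = ['A'] * len(name)
--     arrName = list(name)
--     idx = 0
--     # 종료조건 : alpa가 name과 동일할때.
--     while ''.join(alpa) != name:
--         # <=N -> 올리기, 아니면 꺼꾸로
--         if alpa[idx] != arrName[idx]:
--             answer += min((ord('Z')-ord(arrName[idx])+1),
--                           ord(arrName[idx])-ord('A'))
--             alpa[idx] = arrName[idx]
--         else:
--             up, down = 0, 0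
--             move = 0
--             while alpa[up] == arrName[up] and alpa[down] == arrName[down]:
--                 move += 1
--                 up = idx+move if (idx +
--                                   move) < len(name) else (len(name) - (idx+move))
--                 if alpa[up] != arrName[up]:
--                     idx = up
--                     break
--                 down = idx - \
--                     move if (idx-move) >= 0 else (len(name) + (idx-move))
--                 if alpa[down] != arrName[down]:
--                     idx = down
--                     break
--             answer += move
--     return answer
-- ===== SOURCE B (Python) =====
-- def solution(name):
--     n = len(name)
--     # letter cost of every position, paid once up front
--     answer = sum(min(ord(c) - 65, 91 - ord(c)) for c in name)
--     # positions that need the cursor, in increasing order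
--     targets = [i for i, c in enumerate(name) if c != 'A']
--     lo, hi = 0, len(targets) - 1
--     idx = 0
--     while lo <= hi:
--         up = targets[lo] - idx
--         wrap = idx + n - targets[hi]
--         if up <= wrap:
--             answer += up
--             idx = targets[lo]
--             lo += 1
--         else:
--             # wrap to the top target, then sweep down through the rest:
--             # wrap + (targets[hi] - targets[lo]) telescoped
--             answer += idx + n - targets[lo]
--             break
--     return answer
-- ===== Notes on version B (the rewrite author's own statement) =====
-- stated objective: faster
-- what changed: B pays all letter costs in one pass, then computes the cursor travel with a two-pointer sweep over the sorted mismatch positions (next target is always the lowest remaining, or one wrap to the highest followed by a telescoped downward sweep added in closed form), instead of A's simulation that rebuilds/joins the typed string each iteration and scans outward step by step for the nearest mismatch.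
import Mathlib
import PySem

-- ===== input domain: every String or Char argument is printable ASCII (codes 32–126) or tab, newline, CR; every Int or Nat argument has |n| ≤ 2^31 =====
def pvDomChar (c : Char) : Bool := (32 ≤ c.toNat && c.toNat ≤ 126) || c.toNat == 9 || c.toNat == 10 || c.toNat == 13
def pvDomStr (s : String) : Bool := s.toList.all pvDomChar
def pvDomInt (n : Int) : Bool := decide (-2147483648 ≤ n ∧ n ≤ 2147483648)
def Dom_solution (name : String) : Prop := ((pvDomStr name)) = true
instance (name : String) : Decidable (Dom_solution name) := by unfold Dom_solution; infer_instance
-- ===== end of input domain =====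

-- B pays all letter costs in one pass and computes the cursor travel by a two-pointer sweep over the
-- sorted mismatch positions (with a closed-form telescoped tail after the single wrap), replacing A's
-- O(n^2) simulation that re-joins the typed string and scans outward for the nearest mismatch.

-- ===== PORT A =====

-- ord(c)
def pvOrd (c : Char) : Int := (c.toNat : Int)

-- alpa[i] = v  (Python wraps a negative index; out-of-range never happens in A's run)
def pvSetAt (xs : List Char) (i : Int) (v : Char) : List Char :=
  if 0 ≤ i then xs.set i.toNat v else xs.set (xs.length + i).toNat v

-- A's inner `while alpa[up]==arrName[up] and alpa[down]==arrName[down]` loop; `idx` is the enclosing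
-- variable read by the body; the returned pair is (idx after the break, move). The fuel (len(name) at
-- the call site) only bounds the iteration count: the Python loop always breaks before it runs out.
-- (Python compares alpa[up] == arrName[up], an in-range access wherever this runs; pyGet? = pyGet? is exact there.)
def innerA (alpa arr : List Char) (n idx : Int) :
    Nat → Int → Int → Int → Int × Int
  | 0, _, _, move => (idx, move)
  | fuel + 1, up, down, move =>
    if PySem.List.pyGet? alpa up = PySem.List.pyGet? arr up
        ∧ PySem.List.pyGet? alpa down = PySem.List.pyGet? arr down then
      let move' := move + 1
      let up' := if idx + move' < n then idx + move' else n - (idx + move')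
      if PySem.List.pyGet? alpa up' ≠ PySem.List.pyGet? arr up' then (up', move')
      else
        let down' := if idx - move' ≥ 0 then idx - move' else n + (idx - move')
        if PySem.List.pyGet? alpa down' ≠ PySem.List.pyGet? arr down' then (down', move')
        else innerA alpa arr n idx fuel up' down' move'
    else (idx, move)

-- A's outer `while ''.join(alpa) != name` loop.  ''.join(alpa) == name iff the char lists are equal,
-- so the test is transliterated on the lists.  arrName[idx] is in range wherever the branch runs
-- (pyGetD is exact there).  The fuel 2*len+2 dominates the loop's iteration count: each iteration
-- either fixes a mismatched position or moves idx onto one.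
def outerA (arr : List Char) (n : Int) :
    Nat → List Char → Int → Int → Int
  | 0, _, _, answer => answer
  | fuel + 1, alpa, idx, answer =>
    if alpa ≠ arr then
      if PySem.List.pyGet? alpa idx ≠ PySem.List.pyGet? arr idx then
        outerA arr n fuel (pvSetAt alpa idx (PySem.List.pyGetD arr idx 'A')) idx
          (answer + min (pvOrd 'Z' - pvOrd (PySem.List.pyGetD arr idx 'A') + 1)
                        (pvOrd (PySem.List.pyGetD arr idx 'A') - pvOrd 'A'))
      else
        let r := innerA alpa arr n idx n.toNat 0 0 0
        outerA arr n fuel alpa r.1 (answer + r.2)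
    else answer

def solution (name : String) : Int :=
  let arrName := name.toList                     -- list(name)
  let n : Int := (arrName.length : Int)          -- len(name)
  outerA arrName n (2 * arrName.length + 2) (List.replicate arrName.length 'A') 0 0

-- ===== PORT B =====

-- Source B's `while lo <= hi` two-pointer sweep: the next target is always targets[lo] (one step up)
-- unless wrapping to targets[hi] is strictly cheaper, in which case the whole remaining downward
-- sweep is added in closed form (idx + n - targets[lo]) and the loop breaks.
def loopAlt (ts : List Int) (n : Int) :
    Nat → Int → Int → Int → Int → Int
  | 0, _, _, _, answer => answer
  | fuel + 1, lo, hi, idx, answer =>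
    if lo ≤ hi then
      let up := PySem.List.pyGetD ts lo 0 - idx
      let wrap := idx + n - PySem.List.pyGetD ts hi 0
      if up ≤ wrap then
        loopAlt ts n fuel (lo + 1) hi (PySem.List.pyGetD ts lo 0) (answer + up)
      else answer + (idx + n - PySem.List.pyGetD ts lo 0)
    else answer

def solution_alt (name : String) : Int :=
  let arr := name.toList
  let n : Int := (arr.length : Int)
  -- sum(min(ord(c) - 65, 91 - ord(c)) for c in name)
  let answer := arr.foldl (fun acc c => acc + min ((c.toNat : Int) - 65) (91 - (c.toNat : Int))) 0
  -- [i for i, c in enumerate(name) if c != 'A']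
  let ts := ((PySem.List.enumerate arr).filter (fun p => decide (p.2 ≠ 'A'))).map (·.1)
  loopAlt ts n (ts.length + 1) 0 ((ts.length : Int) - 1) 0 answer

-- ===== PRECONDITION & SPEC =====
def Spec_solution (name : String) (out : Int) : Prop := out = solution_alt name
instance (name : String) (out : Int) : Decidable (Spec_solution name out) := by unfold Spec_solution; infer_instance

-- ===== CLAIM (what is proved, stated in full; the proofs are below) =====
def Claim_equal_solution : Prop := ∀ (name : String), Dom_solution name → Spec_solution name (solution name)

-- ===== LEMMAS AND PROOFS =====

-- ---------- proof-internal middle model: A's greedy on the set of still-mismatched indices ----------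

-- A's inner scan, recast over the set `todo` of still-mismatched indices (proof-internal).
def scanM (todo : PySem.Set Int) (n idx : Int) : List Int → Int × Int
  | [] => (idx, n)
  | move :: rest =>
    let u := idx + move
    let up := if u ≥ n then PySem.Int.mod (2 * n - u) n else u
    if PySem.Set.contains todo up then (up, move)
    else
      let down := PySem.Int.mod (idx - move) n
      if PySem.Set.contains todo down then (down, move)
      else scanM todo n idx rest

-- A's outer loop, recast over `todo` (proof-internal).
def loopM (arr : List Char) (n : Int) :
    Nat → PySem.Set Int → Int → Int → Int
  | 0, _, _, answer => answer
  | fuel + 1, todo, idx, answer =>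
    if todo ≠ [] then
      if PySem.Set.contains todo idx then
        loopM arr n fuel (PySem.Set.discard todo idx) idx
          (answer + min (91 - pvOrd (PySem.List.pyGetD arr idx 'A'))
                        (pvOrd (PySem.List.pyGetD arr idx 'A') - 65))
      else
        let r := scanM todo n idx (PySem.List.pyRange 1 (n + 1))
        loopM arr n fuel todo r.1 (answer + r.2)
    else answer

-- letter cost of position j, as loopM pays it
def letterC (arr : List Char) (j : Int) : Int :=
  min (91 - pvOrd (PySem.List.pyGetD arr j 'A')) (pvOrd (PySem.List.pyGetD arr j 'A') - 65)

def letterSum (arr : List Char) (l : List Int) : Int := (l.map (letterC arr)).sum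

-- travel cost of B's sweep (abstract form of loopAlt)
def Wfun (n : Int) : List Int → Int → Int
  | [], _ => 0
  | t :: rest, idx =>
    if t - idx ≤ idx + n - rest.getLastD t then (t - idx) + Wfun n rest t
    else idx + n - t

-- travel cost of the forced downward sweep
def tailCost (idx : Int) : List Int → Int
  | [] => 0
  | t :: _ => idx - t

-- ---------- A-side machinery: outerA = loopM ----------

-- "position i of the typed prefix already agrees with the target"
def Matched (arr alpa : List Char) (i : Int) : Prop :=
  PySem.List.pyGet? alpa i = PySem.List.pyGet? arr i

-- the todo set holds exactly the indices where alpa still disagrees with arr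
def InvT (arr alpa : List Char) (todo : List Int) : Prop :=
  ∀ j : Int, j ∈ todo ↔ 0 ≤ j ∧ j < (arr.length : Int) ∧ ¬ Matched arr alpa j

-- the index expressions A's scan probes at step m (as written in innerA)
def uA (n idx m : Int) : Int := if idx + m < n then idx + m else n - (idx + m)
def dA (n idx m : Int) : Int := if idx - m ≥ 0 then idx - m else n + (idx - m)

-- Python's negative-index access, shifted by the length
lemma pyGet?_neg_shift {α : Type} (xs : List α) (i : Int)
    (h1 : -(xs.length : Int) ≤ i) (h2 : i < 0) :
    PySem.List.pyGet? xs i = PySem.List.pyGet? xs (i + (xs.length : Int)) := by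
  have hk : i = -(((-i).toNat : Nat) : Int) := by omega
  rw [hk, PySem.List.pyGet?_neg_natCast xs (-i).toNat (by omega) (by omega),
    PySem.List.pyGet?_of_nonneg xs (by omega : (0:Int) ≤ -(((-i).toNat : Nat) : Int) + (xs.length : Int))]
  congr 1
  omega

lemma contains_bridge (arr alpa : List Char) (todo : List Int)
    (hT : InvT arr alpa todo) (j : Int) (h0 : 0 ≤ j) (h1 : j < (arr.length : Int)) :
    PySem.Set.contains todo j = true ↔ ¬ Matched arr alpa j := by
  rw [PySem.Set.contains_iff, hT j]
  exact ⟨fun h => h.2.2, fun h => ⟨h0, h1, h⟩⟩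

lemma contains_bridge_false (arr alpa : List Char) (todo : List Int)
    (hT : InvT arr alpa todo) (j : Int) (h0 : 0 ≤ j) (h1 : j < (arr.length : Int))
    (hm : Matched arr alpa j) : PySem.Set.contains todo j = false := by
  rw [Bool.eq_false_iff]
  intro h
  exact (contains_bridge arr alpa todo hT j h0 h1).mp h hm

-- one step of the "down" half of the scan, then the recursive tail (shared by all "up" cases)
lemma inner_down (arr alpa : List Char) (todo : List Int) (idx : Int)
    (hL : alpa.length = arr.length)
    (hT : InvT arr alpa todo)
    (h0 : 0 ≤ idx) (h1 : idx < ((arr.length : Int)))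
    (f : Nat) (move : Int) (hm : 0 ≤ move)
    (hfm : move + 1 + (f : Int) = ((arr.length : Int)))
    (ih : ∀ (move up0 down0 : Int),
      move + (f : Int) = ((arr.length : Int)) →
      0 ≤ move →
      Matched arr alpa up0 → Matched arr alpa down0 →
      (∀ m : Int, 1 ≤ m → m ≤ move →
        Matched arr alpa (uA ((arr.length : Int)) idx m) ∧ Matched arr alpa (dA ((arr.length : Int)) idx m)) →
      innerA alpa arr ((arr.length : Int)) idx f up0 down0 move
        = scanM todo ((arr.length : Int)) idx (PySem.List.pyRange (move+1) (((arr.length : Int))+1))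
      ∧ 0 ≤ (innerA alpa arr ((arr.length : Int)) idx f up0 down0 move).1
      ∧ (innerA alpa arr ((arr.length : Int)) idx f up0 down0 move).1 < ((arr.length : Int)))
    (hH : (∀ m : Int, 1 ≤ m → m ≤ move →
        Matched arr alpa (uA ((arr.length : Int)) idx m) ∧ Matched arr alpa (dA ((arr.length : Int)) idx m)))
    (upArg : Int) (hupM : Matched arr alpa upArg)
    (hHup : Matched arr alpa (uA ((arr.length : Int)) idx (move+1))) :
    (if PySem.List.pyGet? alpa (dA ((arr.length : Int)) idx (move+1)) ≠ PySem.List.pyGet? arr (dA ((arr.length : Int)) idx (move+1)) then ((dA ((arr.length : Int)) idx (move+1)), move+1)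
       else innerA alpa arr ((arr.length : Int)) idx f upArg (dA ((arr.length : Int)) idx (move+1)) (move+1))
      = (if PySem.Set.contains todo (PySem.Int.mod (idx - (move+1)) ((arr.length : Int))) = true
         then (PySem.Int.mod (idx - (move+1)) ((arr.length : Int)), move+1)
         else scanM todo ((arr.length : Int)) idx (PySem.List.pyRange (move+1+1) (((arr.length : Int))+1)))
    ∧ 0 ≤ ((if PySem.List.pyGet? alpa (dA ((arr.length : Int)) idx (move+1)) ≠ PySem.List.pyGet? arr (dA ((arr.length : Int)) idx (move+1)) then ((dA ((arr.length : Int)) idx (move+1)), move+1)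
       else innerA alpa arr ((arr.length : Int)) idx f upArg (dA ((arr.length : Int)) idx (move+1)) (move+1))).1 ∧ ((if PySem.List.pyGet? alpa (dA ((arr.length : Int)) idx (move+1)) ≠ PySem.List.pyGet? arr (dA ((arr.length : Int)) idx (move+1)) then ((dA ((arr.length : Int)) idx (move+1)), move+1)
       else innerA alpa arr ((arr.length : Int)) idx f upArg (dA ((arr.length : Int)) idx (move+1)) (move+1))).1 < ((arr.length : Int)) := by
  have hH' : ∀ dval : Int, dA ((arr.length : Int)) idx (move+1) = dval → Matched arr alpa dval →
      ∀ m : Int, 1 ≤ m → m ≤ move + 1 →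
      Matched arr alpa (uA ((arr.length : Int)) idx m) ∧ Matched arr alpa (dA ((arr.length : Int)) idx m) := by
    intro dval hdv hdm m hm1 hm2
    by_cases hmm : m ≤ move
    · exact hH m hm1 hmm
    · have hme : m = move + 1 := by omega
      subst hme
      exact ⟨hHup, by rw [hdv]; exact hdm⟩
  by_cases hd : idx - (move+1) ≥ 0
  · have hdfold : dA ((arr.length : Int)) idx (move+1) = idx - (move+1) := by unfold dA; rw [if_pos hd]
    have e3 : PySem.Int.mod (idx - (move+1)) ((arr.length : Int)) = idx - (move+1) := by
      rw [PySem.Int.mod_eq_emod_of_pos (by omega)]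
      exact Int.emod_eq_of_lt (by omega) (by omega)
    rw [hdfold, e3]
    by_cases hdm : PySem.List.pyGet? alpa (idx - (move+1)) ≠ PySem.List.pyGet? arr (idx - (move+1))
    · rw [if_pos hdm, (contains_bridge arr alpa todo hT _ (by omega) (by omega)).mpr hdm,
        if_pos rfl]
      exact ⟨rfl, by simp; omega, by simp; omega⟩
    · have hdmEq : Matched arr alpa (idx - (move+1)) := not_not.mp hdm
      rw [if_neg hdm,
        contains_bridge_false arr alpa todo hT _ (by omega) (by omega) hdmEq,
        if_neg Bool.false_ne_true]
      exact ih (move+1) upArg (idx - (move+1)) (by omega) (by omega) hupM hdmEq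
        (hH' _ hdfold hdmEq)
  · have hdfold : dA ((arr.length : Int)) idx (move+1) = ((arr.length : Int)) + (idx - (move+1)) := by unfold dA; rw [if_neg hd]
    have e3 : PySem.Int.mod (idx - (move+1)) ((arr.length : Int)) = ((arr.length : Int)) + (idx - (move+1)) := by
      rw [PySem.Int.mod_eq_emod_of_pos (by omega), ← Int.add_emod_right (idx - (move+1)) ((arr.length : Int)),
        Int.emod_eq_of_lt (by omega) (by omega)]
      omega
    rw [hdfold, e3]
    by_cases hdm : PySem.List.pyGet? alpa (((arr.length : Int)) + (idx - (move+1))) ≠ PySem.List.pyGet? arr (((arr.length : Int)) + (idx - (move+1)))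
    · rw [if_pos hdm, (contains_bridge arr alpa todo hT _ (by omega) (by omega)).mpr hdm,
        if_pos rfl]
      exact ⟨rfl, by simp; omega, by simp; omega⟩
    · have hdmEq : Matched arr alpa (((arr.length : Int)) + (idx - (move+1))) := not_not.mp hdm
      rw [if_neg hdm,
        contains_bridge_false arr alpa todo hT _ (by omega) (by omega) hdmEq,
        if_neg Bool.false_ne_true]
      exact ih (move+1) upArg (((arr.length : Int)) + (idx - (move+1))) (by omega) (by omega) hupM hdmEq
        (hH' _ hdfold hdmEq)

-- the inner scan: A's pointer walk equals the set-based scan, and the break index stays inside [0, n)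
lemma inner_eq (arr alpa : List Char) (todo : List Int) (idx : Int)
    (hL : alpa.length = arr.length)
    (hT : InvT arr alpa todo)
    (h0 : 0 ≤ idx) (h1 : idx < ((arr.length : Int)))
    (hz : Matched arr alpa 0)
    (hi : Matched arr alpa idx) :
    ∀ (fuel : Nat) (move up0 down0 : Int),
      move + (fuel : Int) = ((arr.length : Int)) →
      0 ≤ move →
      Matched arr alpa up0 → Matched arr alpa down0 →
      (∀ m : Int, 1 ≤ m → m ≤ move →
        Matched arr alpa (uA ((arr.length : Int)) idx m) ∧ Matched arr alpa (dA ((arr.length : Int)) idx m)) →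
      innerA alpa arr ((arr.length : Int)) idx fuel up0 down0 move
        = scanM todo ((arr.length : Int)) idx (PySem.List.pyRange (move+1) (((arr.length : Int))+1))
      ∧ 0 ≤ (innerA alpa arr ((arr.length : Int)) idx fuel up0 down0 move).1
      ∧ (innerA alpa arr ((arr.length : Int)) idx fuel up0 down0 move).1 < ((arr.length : Int)) := by
  intro fuel
  induction fuel with
  | zero =>
    intro move up0 down0 hf hm hup hdown _
    have hmv : move = ((arr.length : Int)) := by push_cast at hf; omega
    have hnil : PySem.List.pyRange (move+1) (((arr.length : Int))+1) = [] := by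
      rw [hmv]; simp [PySem.List.pyRange]
    rw [hnil]
    exact ⟨by simp [innerA, scanM, hmv], by simpa [innerA] using h0, by simpa [innerA] using h1⟩
  | succ f ih =>
    intro move up0 down0 hf hm hup hdown hH
    have hLi : (alpa.length : Int) = ((arr.length : Int)) := by exact_mod_cast congrArg (Nat.cast (R := Int)) hL
    have hn1 : 0 < ((arr.length : Int)) := by push_cast at hf; omega
    have hmlt : move < ((arr.length : Int)) := by push_cast at hf; omega
    have hfm : move + 1 + (f : Int) = ((arr.length : Int)) := by push_cast at hf ⊢; omega
    rw [PySem.List.pyRange_one_cons (by omega : move + 1 < ((arr.length : Int)) + 1)]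
    simp only [innerA, scanM]
    rw [if_pos ⟨hup, hdown⟩]
    rw [show (if idx - (move + 1) ≥ 0 then idx - (move + 1) else ((arr.length : Int)) + (idx - (move + 1))) = dA ((arr.length : Int)) idx (move+1) from rfl]
    by_cases hcase : idx + (move + 1) < ((arr.length : Int))
    · rw [if_pos hcase, if_neg (by omega : ¬ idx + (move + 1) ≥ ((arr.length : Int)))]
      by_cases hu : PySem.List.pyGet? alpa (idx + (move + 1)) ≠ PySem.List.pyGet? arr (idx + (move + 1))
      · rw [if_pos hu, (contains_bridge arr alpa todo hT _ (by omega) (by omega)).mpr hu,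
          if_pos rfl]
        exact ⟨rfl, by simp; omega, by simp; omega⟩
      · have huEq : Matched arr alpa (idx + (move + 1)) := not_not.mp hu
        rw [if_neg hu,
          contains_bridge_false arr alpa todo hT _ (by omega) (by omega) huEq,
          if_neg Bool.false_ne_true]
        exact inner_down arr alpa todo idx hL hT h0 h1 f move hm hfm ih hH
          (idx + (move + 1)) huEq (by unfold uA; rw [if_pos hcase]; exact huEq)
    · rw [if_neg hcase, if_pos (by omega : idx + (move + 1) ≥ ((arr.length : Int)))]
      by_cases hueq : idx + (move + 1) = ((arr.length : Int))
      · have e1 : ((arr.length : Int)) - (idx + (move + 1)) = 0 := by omega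
        have e2 : PySem.Int.mod (2*((arr.length : Int)) - (idx + (move + 1))) ((arr.length : Int)) = 0 := by
          rw [PySem.Int.mod_eq_emod_of_pos (by omega),
            show 2*((arr.length : Int)) - (idx + (move+1)) = ((arr.length : Int)) from by omega]
          exact Int.emod_self
        rw [e1, e2,
          if_neg (show ¬ (PySem.List.pyGet? alpa 0 ≠ PySem.List.pyGet? arr 0) from not_not_intro hz),
          contains_bridge_false arr alpa todo hT 0 le_rfl (by omega) hz,
          if_neg Bool.false_ne_true]
        exact inner_down arr alpa todo idx hL hT h0 h1 f move hm hfm ih hH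
          0 hz (by unfold uA; rw [if_neg hcase, e1]; exact hz)
      · have e2 : PySem.Int.mod (2*((arr.length : Int)) - (idx + (move + 1))) ((arr.length : Int)) = 2*((arr.length : Int)) - (idx + (move + 1)) := by
          rw [PySem.Int.mod_eq_emod_of_pos (by omega)]
          exact Int.emod_eq_of_lt (by omega) (by omega)
        rw [e2]
        have hplow : 1 ≤ 2*((arr.length : Int)) - (idx + (move + 1)) := by omega
        have hphigh : 2*((arr.length : Int)) - (idx + (move + 1)) < ((arr.length : Int)) := by omega
        -- A's probe index n-(idx+move') is negative here; its effective position 2n-(idx+move')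
        -- was already probed earlier in this scan (or is idx itself), hence still matched:
        have hp : Matched arr alpa (2*((arr.length : Int)) - (idx + (move + 1))) := by
          by_cases h3 : move + 1 ≤ 2*(((arr.length : Int)) - idx) - 1
          · have hw := (hH (2*((arr.length : Int)) - 2*idx - (move+1)) (by omega) (by omega)).1
            unfold uA at hw
            rw [if_pos (by omega)] at hw
            rw [show idx + (2*((arr.length : Int)) - 2*idx - (move+1)) = 2*((arr.length : Int)) - (idx + (move+1)) from by ring] at hw
            exact hw
          · by_cases h4 : move + 1 = 2*(((arr.length : Int)) - idx)
            · rw [show 2*((arr.length : Int)) - (idx + (move+1)) = idx from by omega]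
              exact hi
            · have hw := (hH (move + 1 - 2*(((arr.length : Int)) - idx)) (by omega) (by omega)).2
              unfold dA at hw
              rw [if_pos (by omega)] at hw
              rw [show idx - (move + 1 - 2*(((arr.length : Int)) - idx)) = 2*((arr.length : Int)) - (idx + (move+1)) from by ring] at hw
              exact hw
        have hA : Matched arr alpa (((arr.length : Int)) - (idx + (move + 1))) := by
          unfold Matched
          rw [pyGet?_neg_shift alpa _ (by omega) (by omega),
            pyGet?_neg_shift arr _ (by omega) (by omega),
            show ((arr.length : Int)) - (idx + (move + 1)) + (alpa.length : Int) = 2*((arr.length : Int)) - (idx + (move + 1)) from by omega,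
            show ((arr.length : Int)) - (idx + (move + 1)) + ((arr.length : Int)) = 2*((arr.length : Int)) - (idx + (move + 1)) from by omega]
          exact hp
        rw [if_neg (show ¬ (PySem.List.pyGet? alpa (((arr.length : Int)) - (idx + (move + 1))) ≠ PySem.List.pyGet? arr (((arr.length : Int)) - (idx + (move + 1)))) from not_not_intro hA),
          contains_bridge_false arr alpa todo hT _ (by omega) (by omega) hp,
          if_neg Bool.false_ne_true]
        exact inner_down arr alpa todo idx hL hT h0 h1 f move hm hfm ih hH
          (((arr.length : Int)) - (idx + (move + 1))) hA (by unfold uA; rw [if_neg hcase]; exact hA)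

-- the outer loops agree step for step
lemma outer_eq (arr : List Char) :
    ∀ (fuel : Nat) (alpa : List Char) (todo : List Int) (idx answer : Int),
      alpa.length = arr.length →
      InvT arr alpa todo →
      (((arr.length : Int)) = 0 ∨ (0 ≤ idx ∧ idx < ((arr.length : Int)))) →
      (Matched arr alpa 0 ∨ idx = 0) →
      outerA arr ((arr.length : Int)) fuel alpa idx answer = loopM arr ((arr.length : Int)) fuel todo idx answer := by
  intro fuel
  induction fuel with
  | zero => intro alpa todo idx answer _ _ _ _; rfl
  | succ f ih =>
    intro alpa todo idx answer hL hT hidx hz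
    by_cases heq : alpa = arr
    · have htodo : todo = [] := by
        rw [List.eq_nil_iff_forall_not_mem]
        intro j hj
        exact ((hT j).mp hj).2.2 (by subst heq; rfl)
      subst heq
      simp [outerA, loopM, htodo]
    · have hne : ∃ k : Nat, k < arr.length ∧ alpa[k]? ≠ arr[k]? := by
        by_contra hc
        push Not at hc
        exact heq (List.ext_getElem? (fun i => by
          by_cases hilt : i < arr.length
          · exact hc i hilt
          · rw [List.getElem?_eq_none (by omega), List.getElem?_eq_none (by omega : arr.length ≤ i)]))
      obtain ⟨k, hk, hkne⟩ := hne
      have hkmem : (k : Int) ∈ todo := by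
        rw [hT]
        refine ⟨by omega, by exact_mod_cast hk, ?_⟩
        unfold Matched
        rw [PySem.List.pyGet?_natCast, PySem.List.pyGet?_natCast]
        exact hkne
      have htne : todo ≠ [] := List.ne_nil_of_mem hkmem
      have hnpos : 0 < ((arr.length : Int)) := by
        have := ((hT _).mp hkmem).2.1; omega
      obtain ⟨hi0, hi1⟩ : 0 ≤ idx ∧ idx < ((arr.length : Int)) := by
        rcases hidx with h | h
        · omega
        · exact h
      simp only [outerA, loopM]
      rw [if_pos heq, if_pos htne]
      by_cases hmisNe : PySem.List.pyGet? alpa idx ≠ PySem.List.pyGet? arr idx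
      case neg =>
        -- scan branch
        have hmis : Matched arr alpa idx := not_not.mp hmisNe
        have hz' : Matched arr alpa 0 := by
          rcases hz with h | h
          · exact h
          · rwa [h] at hmis
        have hinner := inner_eq arr alpa todo idx hL hT hi0 hi1 hz' hmis
          ((arr.length : Int)).toNat 0 0 0 (by omega) le_rfl hz' hz'
          (fun m hm1 hm2 => absurd (hm1.trans hm2) (by omega))
        rw [show ((0:Int)+1) = (1:Int) from by norm_num] at hinner
        obtain ⟨he, hb0, hb1⟩ := hinner
        rw [he] at hb0 hb1
        rw [if_neg hmisNe,
          contains_bridge_false arr alpa todo hT idx hi0 hi1 hmis,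
          if_neg Bool.false_ne_true, he]
        exact ih alpa todo _ _ hL hT (Or.inr ⟨hb0, hb1⟩) (Or.inl hz')
      case pos =>
        -- fix branch
        rw [if_pos hmisNe, (contains_bridge arr alpa todo hT idx hi0 hi1).mpr hmisNe, if_pos rfl]
        have hZ90 : pvOrd 'Z' = 90 := by decide
        have hA65 : pvOrd 'A' = 65 := by decide
        rw [hZ90, hA65,
          show (90:Int) - pvOrd (PySem.List.pyGetD arr idx 'A') + 1
              = 91 - pvOrd (PySem.List.pyGetD arr idx 'A') from by ring]
        rw [show pvSetAt alpa idx (PySem.List.pyGetD arr idx 'A')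
              = alpa.set idx.toNat (PySem.List.pyGetD arr idx 'A') from by
            unfold pvSetAt; rw [if_pos hi0]]
        have hcv : PySem.List.pyGetD arr idx 'A' = arr[idx.toNat] :=
          PySem.List.pyGetD_eq_getElem arr 'A' hi0 hi1
        have hlen2 : idx.toNat < alpa.length := by omega
        have hM'idx : Matched arr (alpa.set idx.toNat (PySem.List.pyGetD arr idx 'A')) idx := by
          unfold Matched
          rw [PySem.List.pyGet?_eq_some_getElem arr hi0 hi1,
            PySem.List.pyGet?_of_nonneg _ hi0, List.getElem?_set_self hlen2, hcv]
        have hMeq : ∀ j : Int, 0 ≤ j → j ≠ idx →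
            (Matched arr (alpa.set idx.toNat (PySem.List.pyGetD arr idx 'A')) j ↔ Matched arr alpa j) := by
          intro j hj0 hjne
          unfold Matched
          rw [PySem.List.pyGet?_of_nonneg _ hj0,
            List.getElem?_set_ne (by omega : idx.toNat ≠ j.toNat),
            ← PySem.List.pyGet?_of_nonneg alpa hj0]
        have hT' : InvT arr (alpa.set idx.toNat (PySem.List.pyGetD arr idx 'A'))
            (PySem.Set.discard todo idx) := by
          intro j
          rw [PySem.Set.mem_discard, hT j]
          constructor
          · rintro ⟨⟨hj0, hj1, hjm⟩, hne⟩
            exact ⟨hj0, hj1, fun h => hjm ((hMeq j hj0 hne).mp h)⟩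
          · rintro ⟨hj0, hj1, hjm'⟩
            have hne : j ≠ idx := by intro e; subst e; exact hjm' hM'idx
            exact ⟨⟨hj0, hj1, fun h => hjm' ((hMeq j hj0 hne).mpr h)⟩, hne⟩
        have hz' : Matched arr (alpa.set idx.toNat (PySem.List.pyGetD arr idx 'A')) 0 ∨ idx = 0 := by
          by_cases hidx0 : idx = 0
          · exact Or.inr hidx0
          · rcases hz with h | h
            · exact Or.inl ((hMeq 0 le_rfl (fun e => hidx0 e.symm)).mpr h)
            · exact absurd h hidx0
        exact ih _ _ idx _ (by rw [List.length_set]; exact hL) hT' (Or.inr ⟨hi0, hi1⟩) hz'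

-- the starting states of the two loops are related
lemma init_invT (arr : List Char) :
    InvT arr (List.replicate arr.length 'A')
      (PySem.Set.ofList (((PySem.List.enumerate arr).filter (fun p => decide (p.2 ≠ 'A'))).map (·.1))) := by
  intro j
  rw [PySem.Set.mem_ofList, List.mem_map]
  have hrep : ∀ (hj0 : 0 ≤ j) (hj1 : j < ((arr.length : Int))),
      (¬ Matched arr (List.replicate arr.length 'A') j ↔ arr[j.toNat]'(by omega) ≠ 'A') := by
    intro hj0 hj1
    unfold Matched
    rw [PySem.List.pyGet?_of_nonneg _ hj0, PySem.List.pyGet?_of_nonneg _ hj0,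
      List.getElem?_replicate, if_pos (by omega : j.toNat < arr.length),
      List.getElem?_eq_getElem (by omega : j.toNat < arr.length)]
    simp [eq_comm]
  constructor
  · rintro ⟨p, hp, rfl⟩
    rw [List.mem_filter] at hp
    obtain ⟨hpe, hpA⟩ := hp
    rw [PySem.List.mem_enumerate_iff] at hpe
    obtain ⟨k, hk, rfl⟩ := hpe
    simp only [decide_eq_true_eq] at hpA
    have hj0 : (0:Int) ≤ (0 + (k:Int), arr[k]).1 := by simp
    have hj1 : ((0 + (k:Int), arr[k]).1 : Int) < ((arr.length : Int)) := by simp; omega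
    refine ⟨hj0, hj1, (hrep hj0 hj1).mpr ?_⟩
    simpa using hpA
  · rintro ⟨hj0, hj1, hjm⟩
    refine ⟨(0 + (j.toNat : Int), arr[j.toNat]'(by omega)), ?_, by simp; omega⟩
    rw [List.mem_filter, PySem.List.mem_enumerate_iff]
    refine ⟨⟨j.toNat, by omega, rfl⟩, ?_⟩
    simp only [decide_eq_true_eq]
    simpa using (hrep hj0 hj1).mp hjm

-- ---------- small list/set helpers ----------

lemma pvDiscard_of_not_mem {l : List Int} {x : Int} (h : x ∉ l) :
    PySem.Set.discard l x = l := by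
  simp only [PySem.Set.discard]
  apply List.filter_eq_self.mpr
  intro y hy
  simp only [Bool.not_eq_eq_eq_not, Bool.not_true, beq_eq_false_iff_ne]
  exact fun e => h (e ▸ hy)

lemma pvDiscard_cons_self {t : Int} {rest : List Int} (h : t ∉ rest) :
    PySem.Set.discard (t :: rest) t = rest := by
  simp only [PySem.Set.discard, List.filter_cons, BEq.rfl, Bool.not_true]
  have := pvDiscard_of_not_mem h
  simpa [PySem.Set.discard] using this

lemma pvDiscard_append_singleton {init : List Int} {L : Int} (h : L ∉ init) :
    PySem.Set.discard (init ++ [L]) L = init := by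
  simp only [PySem.Set.discard, List.filter_append]
  rw [show List.filter (fun y => !y == L) [L] = [] from by simp]
  rw [List.append_nil]
  have := pvDiscard_of_not_mem h
  simpa [PySem.Set.discard] using this

lemma pvOfList_nodup : ∀ (l : List Int), l.Nodup → PySem.Set.ofList l = l := by
  intro l
  induction l with
  | nil => intro _; rfl
  | cons x xs ih =>
    intro h
    obtain ⟨hx, hxs⟩ := List.nodup_cons.mp h
    rw [PySem.Set.ofList_cons, ih hxs, pvDiscard_of_not_mem hx]

lemma pvGetLastD_mem : ∀ (rest : List Int) (t : Int), rest.getLastD t ∈ t :: rest := by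
  intro rest
  induction rest with
  | nil => intro t; simp
  | cons a as ih =>
    intro t
    rw [List.getLastD_cons]
    have := ih a
    simp only [List.mem_cons] at this ⊢
    tauto

lemma pvSorted_head_le {t : Int} {rest : List Int}
    (h : List.Pairwise (· < ·) (t :: rest)) : ∀ j ∈ t :: rest, t ≤ j := by
  intro j hj
  rcases List.mem_cons.mp hj with rfl | hj'
  · exact le_rfl
  · exact le_of_lt ((List.pairwise_cons.mp h).1 j hj')

lemma pvSorted_le_getLastD : ∀ (rest : List Int) (t : Int),
    List.Pairwise (· < ·) (t :: rest) → ∀ j ∈ t :: rest, j ≤ rest.getLastD t := by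
  intro rest
  induction rest with
  | nil => intro t _ j hj; simp at hj; simp [hj]
  | cons a as ih =>
    intro t h j hj
    rw [List.getLastD_cons]
    have h' : List.Pairwise (· < ·) (a :: as) := (List.pairwise_cons.mp h).2
    rcases List.mem_cons.mp hj with rfl | hj'
    · have ha : a ≤ as.getLastD a := ih a h' a (by simp)
      have : j < a := (List.pairwise_cons.mp h).1 a (by simp)
      omega
    · exact ih a h' j hj'

lemma pvGetLastD_eq_getLast : ∀ (rest : List Int) (t : Int),
    rest.getLastD t = (t :: rest).getLast (by simp) := by
  intro rest
  induction rest with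
  | nil => intro t; rfl
  | cons a as ih =>
    intro t
    rw [List.getLastD_cons, ih a]
    rfl

-- ---------- closed form of the set-based scan ----------

-- main phase: every remaining target is above the cursor; the scan breaks at the lowest target t
-- (distance t - idx) unless the cyclic wrap to the highest target L is strictly cheaper.
lemma scanM_main (l : List Int) (n idx t L : Int)
    (hmemT : t ∈ l) (hmemL : L ∈ l)
    (hbd : ∀ j ∈ l, t ≤ j ∧ j ≤ L)
    (hrange : ∀ j ∈ l, idx < j ∧ j < n)
    (h0 : 0 ≤ idx) :
    ∀ m : Int, 1 ≤ m → m ≤ min (t - idx) (idx + n - L) →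
      scanM l n idx (PySem.List.pyRange m (n + 1)) =
        if t - idx ≤ idx + n - L then (t, t - idx) else (L, idx + n - L) := by
  have hidxt : idx < t := (hrange t hmemT).1
  have htL : t ≤ L := (hbd t hmemT).2
  have hLn : L < n := (hrange L hmemL).2
  suffices H : ∀ (k : Nat) (m : Int), (n + 1 - m).toNat ≤ k → 1 ≤ m →
      m ≤ min (t - idx) (idx + n - L) →
      scanM l n idx (PySem.List.pyRange m (n + 1)) =
        if t - idx ≤ idx + n - L then (t, t - idx) else (L, idx + n - L) by
    intro m h1 h2
    exact H (n + 1 - m).toNat m le_rfl h1 h2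
  intro k
  induction k with
  | zero =>
    intro m hk h1 h2
    exfalso
    have : m ≤ t - idx := le_trans h2 (min_le_left _ _)
    omega
  | succ k ih =>
    intro m hk h1 h2
    have hup : m ≤ t - idx := le_trans h2 (min_le_left _ _)
    have hwr : m ≤ idx + n - L := le_trans h2 (min_le_right _ _)
    have hlt : m < n + 1 := by omega
    rw [PySem.List.pyRange_one_cons hlt]
    simp only [scanM]
    have hun : ¬ (idx + m ≥ n) := by omega
    rw [if_neg hun]
    by_cases hmup : m = t - idx
    · -- up hit
      have : PySem.Set.contains l (idx + m) = true :=
        (PySem.Set.contains_iff _ _).mpr (by rw [show idx + m = t from by omega]; exact hmemT)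
      rw [this, if_pos rfl, if_pos (by omega : t - idx ≤ idx + n - L),
        show idx + m = t from by omega, show m = t - idx from by omega]
    · -- up miss: idx + m < t
      have hupmiss : PySem.Set.contains l (idx + m) = false := by
        rw [Bool.eq_false_iff]
        intro hc
        have := (hbd _ ((PySem.Set.contains_iff _ _).mp hc)).1
        omega
      rw [hupmiss, if_neg Bool.false_ne_true]
      by_cases hmd : m ≤ idx
      · -- down probe at idx - m < t: miss, and m < wrap automatically
        have e : PySem.Int.mod (idx - m) n = idx - m := by
          rw [PySem.Int.mod_eq_emod_of_pos (by omega)]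
          exact Int.emod_eq_of_lt (by omega) (by omega)
        rw [e]
        have hdmiss : PySem.Set.contains l (idx - m) = false := by
          rw [Bool.eq_false_iff]
          intro hc
          have := (hrange _ ((PySem.Set.contains_iff _ _).mp hc)).1
          omega
        rw [hdmiss, if_neg Bool.false_ne_true]
        exact ih (m + 1) (by omega) (by omega) (by omega)
      · -- down probe wraps to n + idx - m
        have e : PySem.Int.mod (idx - m) n = n + idx - m := by
          rw [PySem.Int.mod_eq_emod_of_pos (by omega),
            ← Int.add_emod_right (idx - m) n,
            Int.emod_eq_of_lt (by omega) (by omega)]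
          ring
        rw [e]
        by_cases hmw : m = idx + n - L
        · -- down hit at L, and here wrap < up (else the up probe would have hit at m = t - idx ≤ m)
          have : PySem.Set.contains l (n + idx - m) = true :=
            (PySem.Set.contains_iff _ _).mpr (by rw [show n + idx - m = L from by omega]; exact hmemL)
          rw [this, if_pos rfl, if_neg (by omega : ¬ (t - idx ≤ idx + n - L)),
            show n + idx - m = L from by omega, show m = idx + n - L from by omega]
        · have hdmiss : PySem.Set.contains l (n + idx - m) = false := by
            rw [Bool.eq_false_iff]
            intro hc
            have := (hbd _ ((PySem.Set.contains_iff _ _).mp hc)).2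
            omega
          rw [hdmiss, if_neg Bool.false_ne_true]
          exact ih (m + 1) (by omega) (by omega) (by omega)

-- descent phase: every remaining target is strictly below the cursor (and ≥ 1, position 0 having
-- been handled first); the scan breaks at the highest remaining target L.
lemma scanM_desc (l : List Int) (n idx L : Int)
    (hmemL : L ∈ l)
    (hbd : ∀ j ∈ l, 1 ≤ j ∧ j ≤ L)
    (hidx : ∀ j ∈ l, j < idx)
    (hn : idx < n) :
    ∀ m : Int, 1 ≤ m → m ≤ idx - L →
      scanM l n idx (PySem.List.pyRange m (n + 1)) = (L, idx - L) := by
  have hL1 : 1 ≤ L := (hbd L hmemL).1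
  have hLidx : L < idx := hidx L hmemL
  suffices H : ∀ (k : Nat) (m : Int), (n + 1 - m).toNat ≤ k → 1 ≤ m → m ≤ idx - L →
      scanM l n idx (PySem.List.pyRange m (n + 1)) = (L, idx - L) by
    intro m h1 h2
    exact H (n + 1 - m).toNat m le_rfl h1 h2
  intro k
  induction k with
  | zero => intro m hk h1 h2; exfalso; omega
  | succ k ih =>
    intro m hk h1 h2
    have hlt : m < n + 1 := by omega
    rw [PySem.List.pyRange_one_cons hlt]
    simp only [scanM]
    -- up probe always misses
    have hupmiss :
        PySem.Set.contains l (if idx + m ≥ n then PySem.Int.mod (2 * n - (idx + m)) n else idx + m) = false := by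
      by_cases hge : idx + m ≥ n
      · rw [if_pos hge]
        by_cases heq : idx + m = n
        · have e : PySem.Int.mod (2 * n - (idx + m)) n = 0 := by
            rw [PySem.Int.mod_eq_emod_of_pos (by omega), show 2 * n - (idx + m) = n from by omega]
            exact Int.emod_self
          rw [e, Bool.eq_false_iff]
          intro hc
          have := (hbd _ ((PySem.Set.contains_iff _ _).mp hc)).1
          omega
        · have e : PySem.Int.mod (2 * n - (idx + m)) n = 2 * n - idx - m := by
            rw [PySem.Int.mod_eq_emod_of_pos (by omega)]
            rw [show 2 * n - (idx + m) = 2 * n - idx - m from by ring]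
            exact Int.emod_eq_of_lt (by omega) (by omega)
          rw [e, Bool.eq_false_iff]
          intro hc
          have := (hbd _ ((PySem.Set.contains_iff _ _).mp hc)).2
          omega
      · rw [if_neg hge, Bool.eq_false_iff]
        intro hc
        have := hidx _ ((PySem.Set.contains_iff _ _).mp hc)
        omega
    rw [hupmiss, if_neg Bool.false_ne_true]
    have e : PySem.Int.mod (idx - m) n = idx - m := by
      rw [PySem.Int.mod_eq_emod_of_pos (by omega)]
      exact Int.emod_eq_of_lt (by omega) (by omega)
    rw [e]
    by_cases hmL : m = idx - L
    · have : PySem.Set.contains l (idx - m) = true :=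
        (PySem.Set.contains_iff _ _).mpr (by rw [show idx - m = L from by omega]; exact hmemL)
      rw [this, if_pos rfl, show idx - m = L from by omega, show m = idx - L from by omega]
    · have hdmiss : PySem.Set.contains l (idx - m) = false := by
        rw [Bool.eq_false_iff]
        intro hc
        have := (hbd _ ((PySem.Set.contains_iff _ _).mp hc)).2
        omega
      rw [hdmiss, if_neg Bool.false_ne_true]
      exact ih (m + 1) (by omega) (by omega) (by omega)

-- ---------- loopM closed forms ----------

-- forced descent: all remaining targets below the cursor are fixed top-down; the travel telescopes.
lemma loopM_desc (arr : List Char) (n : Int) :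
    ∀ (k : Nat) (l : List Int) (fuel : Nat) (idx ans : Int),
      l.length ≤ k →
      List.Pairwise (· < ·) l →
      (∀ j ∈ l, 1 ≤ j ∧ j < idx) →
      idx < n →
      2 * l.length + 1 ≤ fuel →
      loopM arr n fuel l idx ans = ans + letterSum arr l + tailCost idx l := by
  intro k
  induction k with
  | zero =>
    intro l fuel idx ans hlen _ _ _ hfuel
    have : l = [] := List.length_eq_zero_iff.mp (by omega)
    subst this
    obtain ⟨f, rfl⟩ : ∃ f, fuel = f + 1 := ⟨fuel - 1, by omega⟩
    simp [loopM, letterSum, tailCost]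
  | succ k ih =>
    intro l fuel idx ans hlen hsort hbel hn hfuel
    rcases List.eq_nil_or_concat l with rfl | ⟨init, L, rfl⟩
    · obtain ⟨f, rfl⟩ : ∃ f, fuel = f + 1 := ⟨fuel - 1, by omega⟩
      simp [loopM, letterSum, tailCost]
    · rw [List.concat_eq_append] at hlen hsort hbel hfuel ⊢
      have hmemL : L ∈ init ++ [L] := by simp
      have hinitlt : ∀ y ∈ init, y < L := by
        have := (List.pairwise_append.mp hsort).2.2
        intro y hy
        exact this y hy L (by simp)
      have hbdL : ∀ j ∈ init ++ [L], 1 ≤ j ∧ j ≤ L := by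
        intro j hj
        rcases List.mem_append.mp hj with hj' | hj'
        · exact ⟨(hbel j hj).1, le_of_lt (hinitlt j hj')⟩
        · simp at hj'; subst hj'; exact ⟨(hbel j hj).1, le_rfl⟩
      have hLlt : L < idx := (hbel L hmemL).2
      have hL1 : 1 ≤ L := (hbel L hmemL).1
      obtain ⟨f, rfl⟩ : ∃ f, fuel = f + 2 := ⟨fuel - 2, by simp at hfuel; omega⟩
      show loopM arr n (f + 1 + 1) (init ++ [L]) idx ans = _
      rw [show loopM arr n (f + 1 + 1) (init ++ [L]) idx ans =
          if (init ++ [L]) ≠ [] then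
            (if PySem.Set.contains (init ++ [L]) idx then
              loopM arr n (f + 1) (PySem.Set.discard (init ++ [L]) idx) idx
                (ans + min (91 - pvOrd (PySem.List.pyGetD arr idx 'A'))
                          (pvOrd (PySem.List.pyGetD arr idx 'A') - 65))
            else
              loopM arr n (f + 1) (init ++ [L])
                (scanM (init ++ [L]) n idx (PySem.List.pyRange 1 (n + 1))).1
                (ans + (scanM (init ++ [L]) n idx (PySem.List.pyRange 1 (n + 1))).2))
          else ans from rfl]
      rw [if_pos (by simp)]
      have hnomem : PySem.Set.contains (init ++ [L]) idx = false := by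
        rw [Bool.eq_false_iff]
        intro hc
        have := (hbel _ ((PySem.Set.contains_iff _ _).mp hc)).2
        omega
      rw [hnomem, if_neg Bool.false_ne_true]
      rw [scanM_desc (init ++ [L]) n idx L hmemL hbdL (fun j hj => (hbel j hj).2) hn 1
        (by omega) (by omega)]
      show loopM arr n (f + 1) (init ++ [L]) L (ans + (idx - L)) = _
      rw [show loopM arr n (f + 1) (init ++ [L]) L (ans + (idx - L)) =
          if (init ++ [L]) ≠ [] then
            (if PySem.Set.contains (init ++ [L]) L then
              loopM arr n f (PySem.Set.discard (init ++ [L]) L) L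
                (ans + (idx - L) + min (91 - pvOrd (PySem.List.pyGetD arr L 'A'))
                          (pvOrd (PySem.List.pyGetD arr L 'A') - 65))
            else
              loopM arr n f (init ++ [L])
                (scanM (init ++ [L]) n L (PySem.List.pyRange 1 (n + 1))).1
                (ans + (idx - L) + (scanM (init ++ [L]) n L (PySem.List.pyRange 1 (n + 1))).2))
          else (ans + (idx - L)) from rfl]
      rw [if_pos (by simp), (PySem.Set.contains_iff _ _).mpr hmemL, if_pos rfl,
        pvDiscard_append_singleton (fun hc => absurd (hinitlt L hc) (lt_irrefl L))]
      rw [ih init f L _ (by simp at hlen; omega)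
        ((List.pairwise_append.mp hsort).1)
        (fun j hj => ⟨(hbel j (by simp [hj])).1, hinitlt j hj⟩)
        (by omega)
        (by simp at hfuel ⊢; omega)]
      have hls : letterSum arr (init ++ [L]) = letterSum arr init + letterC arr L := by
        simp [letterSum, letterC]
      rw [hls]
      cases init with
      | nil => simp [tailCost, letterSum, letterC]; ring
      | cons t rest => simp [tailCost, letterC]; ring

-- main phase: loopM's answer is the letter costs plus B's sweep travel.
lemma loopM_main (arr : List Char) (n : Int) :
    ∀ (k : Nat) (l : List Int) (fuel : Nat) (idx ans : Int),
      l.length ≤ k →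
      List.Pairwise (· < ·) l →
      (∀ j ∈ l, idx < j ∧ j < n) →
      0 ≤ idx →
      2 * l.length + 1 ≤ fuel →
      loopM arr n fuel l idx ans = ans + letterSum arr l + Wfun n l idx := by
  intro k
  induction k with
  | zero =>
    intro l fuel idx ans hlen _ _ _ hfuel
    have : l = [] := List.length_eq_zero_iff.mp (by omega)
    subst this
    obtain ⟨f, rfl⟩ : ∃ f, fuel = f + 1 := ⟨fuel - 1, by omega⟩
    simp [loopM, letterSum, Wfun]
  | succ k ih =>
    intro l fuel idx ans hlen hsort habove h0 hfuel
    rcases l with _ | ⟨t, rest⟩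
    · obtain ⟨f, rfl⟩ : ∃ f, fuel = f + 1 := ⟨fuel - 1, by omega⟩
      simp [loopM, letterSum, Wfun]
    · set L := rest.getLastD t with hLdef
      have hmemt : t ∈ t :: rest := by simp
      have hmemL : L ∈ t :: rest := pvGetLastD_mem rest t
      have hbd : ∀ j ∈ t :: rest, t ≤ j ∧ j ≤ L :=
        fun j hj => ⟨pvSorted_head_le hsort j hj, pvSorted_le_getLastD rest t hsort j hj⟩
      have hidxt : idx < t := (habove t hmemt).1
      have hLn : L < n := (habove L hmemL).2
      obtain ⟨f, rfl⟩ : ∃ f, fuel = f + 2 := ⟨fuel - 2, by simp at hfuel; omega⟩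
      show loopM arr n (f + 1 + 1) (t :: rest) idx ans = _
      rw [show loopM arr n (f + 1 + 1) (t :: rest) idx ans =
          if (t :: rest) ≠ [] then
            (if PySem.Set.contains (t :: rest) idx then
              loopM arr n (f + 1) (PySem.Set.discard (t :: rest) idx) idx
                (ans + min (91 - pvOrd (PySem.List.pyGetD arr idx 'A'))
                          (pvOrd (PySem.List.pyGetD arr idx 'A') - 65))
            else
              loopM arr n (f + 1) (t :: rest)
                (scanM (t :: rest) n idx (PySem.List.pyRange 1 (n + 1))).1
                (ans + (scanM (t :: rest) n idx (PySem.List.pyRange 1 (n + 1))).2))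
          else ans from rfl]
      rw [if_pos (by simp)]
      have hnomem : PySem.Set.contains (t :: rest) idx = false := by
        rw [Bool.eq_false_iff]
        intro hc
        have := (habove _ ((PySem.Set.contains_iff _ _).mp hc)).1
        omega
      rw [hnomem, if_neg Bool.false_ne_true]
      rw [scanM_main (t :: rest) n idx t L hmemt hmemL hbd habove h0 1 le_rfl
        (by omega)]
      by_cases hcond : t - idx ≤ idx + n - L
      · -- step up to t, fix it, continue the sweep
        rw [if_pos hcond]
        show loopM arr n (f + 1) (t :: rest) t (ans + (t - idx)) = _
        rw [show loopM arr n (f + 1) (t :: rest) t (ans + (t - idx)) =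
            if (t :: rest) ≠ [] then
              (if PySem.Set.contains (t :: rest) t then
                loopM arr n f (PySem.Set.discard (t :: rest) t) t
                  (ans + (t - idx) + min (91 - pvOrd (PySem.List.pyGetD arr t 'A'))
                            (pvOrd (PySem.List.pyGetD arr t 'A') - 65))
              else
                loopM arr n f (t :: rest)
                  (scanM (t :: rest) n t (PySem.List.pyRange 1 (n + 1))).1
                  (ans + (t - idx) + (scanM (t :: rest) n t (PySem.List.pyRange 1 (n + 1))).2))
            else (ans + (t - idx)) from rfl]
        rw [if_pos (by simp), (PySem.Set.contains_iff _ _).mpr hmemt, if_pos rfl,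
          pvDiscard_cons_self (fun hc => absurd ((List.pairwise_cons.mp hsort).1 t hc) (lt_irrefl t))]
        rw [ih rest f t _ (by simp at hlen; omega)
          ((List.pairwise_cons.mp hsort).2)
          (fun j hj => ⟨(List.pairwise_cons.mp hsort).1 j hj, (habove j (by simp [hj])).2⟩)
          (by omega)
          (by simp at hfuel ⊢; omega)]
        rw [show Wfun n (t :: rest) idx = (t - idx) + Wfun n rest t from by
          simp only [Wfun]; rw [if_pos (hLdef ▸ hcond)]]
        simp [letterSum, letterC]
        ring
      · -- wrap to L, fix it, then the forced descent telescopes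
        rw [if_neg hcond]
        show loopM arr n (f + 1) (t :: rest) L (ans + (idx + n - L)) = _
        rw [show loopM arr n (f + 1) (t :: rest) L (ans + (idx + n - L)) =
            if (t :: rest) ≠ [] then
              (if PySem.Set.contains (t :: rest) L then
                loopM arr n f (PySem.Set.discard (t :: rest) L) L
                  (ans + (idx + n - L) + min (91 - pvOrd (PySem.List.pyGetD arr L 'A'))
                            (pvOrd (PySem.List.pyGetD arr L 'A') - 65))
              else
                loopM arr n f (t :: rest)
                  (scanM (t :: rest) n L (PySem.List.pyRange 1 (n + 1))).1
                  (ans + (idx + n - L) + (scanM (t :: rest) n L (PySem.List.pyRange 1 (n + 1))).2))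
            else (ans + (idx + n - L)) from rfl]
        rw [if_pos (by simp), (PySem.Set.contains_iff _ _).mpr hmemL, if_pos rfl]
        have hLlast : L = (t :: rest).getLast (by simp) := pvGetLastD_eq_getLast rest t
        have hsplit : (t :: rest).dropLast ++ [L] = t :: rest := by
          rw [hLlast]; exact List.dropLast_concat_getLast (by simp)
        have hdllt : ∀ y ∈ (t :: rest).dropLast, y < L := by
          have hp : List.Pairwise (· < ·) ((t :: rest).dropLast ++ [L]) := by
            rw [hsplit]; exact hsort
          intro y hy
          exact (List.pairwise_append.mp hp).2.2 y hy L (by simp)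
        have hdisc : PySem.Set.discard (t :: rest) L = (t :: rest).dropLast := by
          conv_lhs => rw [← hsplit]
          exact pvDiscard_append_singleton (fun hc => absurd (hdllt L hc) (lt_irrefl L))
        rw [hdisc]
        have hdlmem : ∀ j ∈ (t :: rest).dropLast, j ∈ t :: rest := by
          intro j hj
          rw [← hsplit]
          exact List.mem_append.mpr (Or.inl hj)
        rw [loopM_desc arr n (t :: rest).dropLast.length (t :: rest).dropLast f L _ le_rfl
          (by
            have hp : List.Pairwise (· < ·) ((t :: rest).dropLast ++ [L]) := by
              rw [hsplit]; exact hsort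
            exact (List.pairwise_append.mp hp).1)
          (fun j hj => ⟨by have := (habove j (hdlmem j hj)).1; omega, hdllt j hj⟩)
          hLn
          (by
            have hdll : (t :: rest).dropLast.length = rest.length := by simp
            simp at hfuel; omega)]
        rw [show Wfun n (t :: rest) idx = idx + n - t from by
          simp only [Wfun]; rw [if_neg (hLdef ▸ hcond)]]
        have hlsum : letterSum arr (t :: rest) = letterSum arr (t :: rest).dropLast + letterC arr L := by
          conv_lhs => rw [← hsplit]
          simp [letterSum, letterC]
        rw [hlsum]
        cases hdl : (t :: rest).dropLast with
        | nil =>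
          have h1 : [L] = t :: rest := by rw [hdl] at hsplit; simpa using hsplit
          injection h1 with ht hrest
          simp only [tailCost, letterSum, List.map_nil, List.sum_nil, ← ht, letterC]
          omega
        | cons t' dl' =>
          have ht' : t' = t := by
            have := hsplit
            rw [hdl] at this
            exact (List.cons.injEq _ _ _ _ ▸ this.symm).1.symm
          subst ht'
          simp only [tailCost, letterC]
          ring

lemma pvGetLast_congr {l l' : List Int} (h : l = l') {h1 : l ≠ []} :
    l.getLast h1 = l'.getLast (h ▸ h1) := by subst h; rfl

lemma pvGetElem_idx_congr (l : List Int) (a b : Nat) (h : a = b) (ha : a < l.length) :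
    l[a]'ha = l[b]'(h ▸ ha) := by subst h; rfl

-- B's loop equals the abstract sweep Wfun.
lemma loopAlt_spec (ts : List Int) (n : Int) :
    ∀ (fuel : Nat) (lo idx ans : Int),
      0 ≤ lo →
      ts.length + 1 ≤ fuel + lo.toNat →
      loopAlt ts n fuel lo ((ts.length : Int) - 1) idx ans
        = ans + Wfun n (ts.drop lo.toNat) idx := by
  intro fuel
  induction fuel with
  | zero =>
    intro lo idx ans h0 hf
    have : ts.drop lo.toNat = [] := List.drop_eq_nil_of_le (by omega)
    rw [this]
    simp [loopAlt, Wfun]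
  | succ f ih =>
    intro lo idx ans h0 hf
    by_cases hlh : lo ≤ (ts.length : Int) - 1
    · have hlt : lo.toNat < ts.length := by omega
      have hdrop : ts.drop lo.toNat = ts[lo.toNat] :: ts.drop (lo.toNat + 1) :=
        List.drop_eq_getElem_cons hlt
      have hg1 : PySem.List.pyGetD ts lo 0 = ts[lo.toNat] :=
        PySem.List.pyGetD_eq_getElem ts 0 h0 (by omega)
      have hne : ts ≠ [] := by intro h; subst h; simp at hlt
      have hg2 : PySem.List.pyGetD ts ((ts.length : Int) - 1) 0 = ts.getLast hne := by
        have h1 := PySem.List.pyGetD_eq_getElem ts 0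
          (show (0 : Int) ≤ (ts.length : Int) - 1 by omega)
          (show (ts.length : Int) - 1 < (ts.length : Int) by omega)
        have hidx := pvGetElem_idx_congr ts (((ts.length : Int) - 1)).toNat (ts.length - 1)
          (by omega) (by omega)
        rw [h1, hidx, List.getLast_eq_getElem]
      have hdne : ts.drop lo.toNat ≠ [] := by
        intro hc
        rw [hc] at hdrop
        exact (List.cons_ne_nil _ _) hdrop.symm
      have hglast : (ts.drop lo.toNat).getLast hdne = ts.getLast hne := List.getLast_drop hdne
      have hWlast : (ts.drop (lo.toNat + 1)).getLastD ts[lo.toNat] = ts.getLast hne := by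
        rw [pvGetLastD_eq_getLast, pvGetLast_congr hdrop.symm]
        exact hglast
      simp only [loopAlt]
      rw [if_pos hlh, hg1, hg2]
      rw [hdrop]
      simp only [Wfun]
      rw [hWlast]
      by_cases hc : ts[lo.toNat] - idx ≤ idx + n - ts.getLast hne
      · rw [if_pos hc, if_pos hc]
        rw [ih (lo + 1) ts[lo.toNat] (ans + (ts[lo.toNat] - idx)) (by omega)
          (by omega)]
        rw [show (lo + 1).toNat = lo.toNat + 1 from by omega]
        ring
      · rw [if_neg hc, if_neg hc]
    · have : ts.drop lo.toNat = [] := List.drop_eq_nil_of_le (by omega)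
      rw [this]
      simp only [loopAlt, Wfun]
      rw [if_neg hlh]
      ring

-- ---------- the targets list ----------

def pvTargets (arr : List Char) : List Int :=
  ((PySem.List.enumerate arr).filter (fun p => decide (p.2 ≠ 'A'))).map (·.1)

lemma pvTargets_sorted (arr : List Char) : List.Pairwise (· < ·) (pvTargets arr) := by
  unfold pvTargets
  rw [List.pairwise_map]
  exact (PySem.List.pairwise_lt_enumerate arr 0).filter _

lemma pvTargets_bounds (arr : List Char) :
    ∀ j ∈ pvTargets arr, 0 ≤ j ∧ j < (arr.length : Int) := by
  unfold pvTargets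
  intro j hj
  obtain ⟨p, hp, rfl⟩ := List.mem_map.mp hj
  obtain ⟨k, hk, rfl⟩ := (PySem.List.mem_enumerate_iff arr 0 p).mp (List.mem_filter.mp hp).1
  simp
  omega

lemma pvTargets_nodup (arr : List Char) : (pvTargets arr).Nodup :=
  (pvTargets_sorted arr).imp ne_of_lt

lemma pvTargets_len (arr : List Char) : (pvTargets arr).length ≤ arr.length := by
  unfold pvTargets
  have h1 : (((PySem.List.enumerate arr).filter (fun p => decide (p.2 ≠ 'A')))).length
      ≤ (PySem.List.enumerate arr).length := List.length_filter_le _ _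
  have h2 : (PySem.List.enumerate arr).length = arr.length := by
    simp [PySem.List.length_enumerate]
  simp only [List.length_map]
  omega

-- the up-front letter pass equals the letter costs loopM pays at the mismatched positions
lemma pvLetter_fold (arr : List Char) :
    arr.foldl (fun acc c => acc + min ((c.toNat : Int) - 65) (91 - (c.toNat : Int))) 0
      = letterSum arr (pvTargets arr) := by
  have hfold : ∀ (l : List Char) (z : Int),
      l.foldl (fun acc c => acc + min ((c.toNat : Int) - 65) (91 - (c.toNat : Int))) z
        = z + (l.map (fun c => min (91 - (c.toNat : Int)) ((c.toNat : Int) - 65))).sum := by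
    intro l
    induction l with
    | nil => intro z; simp
    | cons c cs ih => intro z; simp [List.foldl_cons, ih]; rw [min_comm]; ring
  rw [hfold]
  have hmap : (pvTargets arr).map (letterC arr)
      = ((PySem.List.enumerate arr).filter (fun p => decide (p.2 ≠ 'A'))).map
          (fun p => min (91 - (p.2.toNat : Int)) ((p.2.toNat : Int) - 65)) := by
    unfold pvTargets
    rw [List.map_map]
    apply List.map_congr_left
    intro p hp
    obtain ⟨k, hk, rfl⟩ := (PySem.List.mem_enumerate_iff arr 0 p).mp (List.mem_filter.mp hp).1
    simp only [Function.comp, letterC, pvOrd]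
    have : PySem.List.pyGetD arr (0 + (k : Int)) 'A' = arr[k] := by
      rw [show (0 + (k : Int)) = ((k : Nat) : Int) from by omega, PySem.List.pyGetD_natCast,
        List.getD_eq_getElem?_getD, List.getElem?_eq_getElem hk]
      rfl
    rw [this]
  have hfilter : ∀ (l : List (Int × Char)),
      ((l.filter (fun p => decide (p.2 ≠ 'A'))).map
          (fun p => min (91 - (p.2.toNat : Int)) ((p.2.toNat : Int) - 65))).sum
        = (l.map (fun p => min (91 - (p.2.toNat : Int)) ((p.2.toNat : Int) - 65))).sum := by
    intro l
    induction l with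
    | nil => simp
    | cons p ps ih =>
      by_cases hA : p.2 = 'A'
      · rw [List.filter_cons_of_neg (by simp [hA]), ih, List.map_cons, List.sum_cons, hA]
        have h0 : min (91 - (('A'.toNat : Int))) (('A'.toNat : Int) - 65) = 0 := by decide
        rw [h0]
        ring
      · rw [List.filter_cons_of_pos (by simp [hA]), List.map_cons, List.sum_cons,
          List.map_cons, List.sum_cons, ih]
  have hsnd : ((PySem.List.enumerate arr).map
      (fun p => min (91 - (p.2.toNat : Int)) ((p.2.toNat : Int) - 65))).sum
        = (arr.map (fun c => min (91 - (c.toNat : Int)) ((c.toNat : Int) - 65))).sum := by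
    rw [show (fun (p : Int × Char) => min (91 - (p.2.toNat : Int)) ((p.2.toNat : Int) - 65))
        = (fun c => min (91 - (c.toNat : Int)) ((c.toNat : Int) - 65)) ∘ (·.2) from rfl,
      ← List.map_map, PySem.List.map_snd_enumerate]
  unfold letterSum
  rw [hmap, hfilter, hsnd]
  ring

-- ===== VERDICT (by name: the statement is the Claim_ definition above) =====
-- top-level assembly: chain solution = loopM = letter costs + sweep = solution_alt
lemma pv_main_eq (arr : List Char) :
    loopM arr ((arr.length : Int)) (2 * arr.length + 2) (pvTargets arr) 0 0
      = letterSum arr (pvTargets arr) + Wfun ((arr.length : Int)) (pvTargets arr) 0 := by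
  rcases hT : pvTargets arr with _ | ⟨t, rest⟩
  · simp [loopM, letterSum, Wfun]
  · have hsort : List.Pairwise (· < ·) (t :: rest) := hT ▸ pvTargets_sorted arr
    have hbnd : ∀ j ∈ t :: rest, 0 ≤ j ∧ j < (arr.length : Int) := hT ▸ pvTargets_bounds arr
    have hlen : (t :: rest).length ≤ arr.length := hT ▸ pvTargets_len arr
    have hn1 : 1 ≤ arr.length := by
      have := (hbnd t (by simp)).2
      have := (hbnd t (by simp)).1
      omega
    by_cases ht0 : t = 0
    · -- position 0 is a target: loopM fixes it first at travel 0; B's sweep takes a zero-length step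
      subst ht0
      obtain ⟨f, hf⟩ : ∃ f, 2 * arr.length + 2 = f + 1 := ⟨2 * arr.length + 1, by omega⟩
      rw [hf]
      rw [show loopM arr ((arr.length : Int)) (f + 1) (0 :: rest) 0 0 =
          if ((0 : Int) :: rest) ≠ [] then
            (if PySem.Set.contains ((0 : Int) :: rest) 0 then
              loopM arr ((arr.length : Int)) f (PySem.Set.discard ((0 : Int) :: rest) 0) 0
                (0 + min (91 - pvOrd (PySem.List.pyGetD arr 0 'A'))
                          (pvOrd (PySem.List.pyGetD arr 0 'A') - 65))
            else
              loopM arr ((arr.length : Int)) f ((0 : Int) :: rest)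
                (scanM ((0 : Int) :: rest) ((arr.length : Int)) 0 (PySem.List.pyRange 1 (((arr.length : Int)) + 1))).1
                (0 + (scanM ((0 : Int) :: rest) ((arr.length : Int)) 0 (PySem.List.pyRange 1 (((arr.length : Int)) + 1))).2))
          else 0 from rfl]
      rw [if_pos (by simp), (PySem.Set.contains_iff _ _).mpr (by simp), if_pos rfl,
        pvDiscard_cons_self (fun hc => absurd ((List.pairwise_cons.mp hsort).1 0 hc) (lt_irrefl 0))]
      rw [loopM_main arr ((arr.length : Int)) rest.length rest f 0 _ le_rfl
        ((List.pairwise_cons.mp hsort).2)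
        (fun j hj => ⟨(List.pairwise_cons.mp hsort).1 j hj, (hbnd j (by simp [hj])).2⟩)
        le_rfl
        (by simp at hlen; omega)]
      have hLmem : rest.getLastD 0 ∈ (0 : Int) :: rest := pvGetLastD_mem rest 0
      have hLn : rest.getLastD 0 < (arr.length : Int) := (hbnd _ hLmem).2
      rw [show Wfun ((arr.length : Int)) ((0 : Int) :: rest) 0
          = (0 - 0) + Wfun ((arr.length : Int)) rest 0 from by
        simp only [Wfun]; rw [if_pos (by omega)]]
      simp only [letterSum, List.map_cons, List.sum_cons, letterC]
      omega
    · have ht1 : 1 ≤ t := by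
        have := (hbnd t (by simp)).1
        omega
      rw [loopM_main arr ((arr.length : Int)) (t :: rest).length (t :: rest) _ 0 _ le_rfl
        hsort
        (fun j hj => ⟨by have := pvSorted_head_le hsort j hj; omega, (hbnd j hj).2⟩)
        le_rfl
        (by simp at hlen ⊢; omega)]
      ring

theorem solution_spec : Claim_equal_solution := by
  intro name _
  unfold Spec_solution
  show solution name = solution_alt name
  have hA : solution name
      = loopM name.toList ((name.toList.length : Int)) (2 * name.toList.length + 2)
          (PySem.Set.ofList (pvTargets name.toList)) 0 0 := by
    show outerA name.toList ((name.toList.length : Int)) (2 * name.toList.length + 2)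
        (List.replicate name.toList.length 'A') 0 0 = _
    exact outer_eq name.toList (2 * name.toList.length + 2)
      (List.replicate name.toList.length 'A') _ 0 0 (by simp) (init_invT name.toList)
      (by omega) (Or.inr rfl)
  have hB : solution_alt name
      = letterSum name.toList (pvTargets name.toList)
          + Wfun ((name.toList.length : Int)) (pvTargets name.toList) 0 := by
    show loopAlt (pvTargets name.toList) ((name.toList.length : Int))
        ((pvTargets name.toList).length + 1) 0 (((pvTargets name.toList).length : Int) - 1) 0
        (name.toList.foldl (fun acc c => acc + min ((c.toNat : Int) - 65) (91 - (c.toNat : Int))) 0) = _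
    rw [pvLetter_fold name.toList,
      loopAlt_spec (pvTargets name.toList) ((name.toList.length : Int)) _ 0 0
        (letterSum name.toList (pvTargets name.toList)) le_rfl (by omega)]
    simp
  rw [hA, hB, pvOfList_nodup _ (pvTargets_nodup name.toList)]
  exact pv_main_eq name.toList
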